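-- pv_equiv track=rewrite | github.com/sksingtn/codewars-solved | 5 Kyu/who_is_next.py | who_is_next
-- ===== SOURCE A (Python) =====
-- def who_is_next(names, r):
--     detail = [[i,1] for i in names]
--     count = 0
--     while (not(r>count-1) or not(r<count+detail[0][1]+1)):
--         count+= detail[0][1]
--         detail[0][1]*=2
--         detail.append(detail.pop(0))
--     return detail[0][0]
-- ===== SOURCE B (Python) =====
-- def who_is_next(names, r):
--     n = len(names)
--     if r <= 1:
--         return names[0]
--     k = 0
--     while n * ((1 << (k + 1)) - 1) < r:
--         k += 1
--     block = 1 << k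
--     return names[(r - n * (block - 1) - 1) // block]
-- ===== Notes on version B (the rewrite author's own statement) =====
-- stated objective: faster
-- what changed: A simulates the queue step by step, rotating a list and doubling the head's weight until position r falls in the head's block; B computes the round k with a doubling loop (geometric-series bound) and then locates the name by one closed-form division, never building or rotating a queue.
import Mathlib
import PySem

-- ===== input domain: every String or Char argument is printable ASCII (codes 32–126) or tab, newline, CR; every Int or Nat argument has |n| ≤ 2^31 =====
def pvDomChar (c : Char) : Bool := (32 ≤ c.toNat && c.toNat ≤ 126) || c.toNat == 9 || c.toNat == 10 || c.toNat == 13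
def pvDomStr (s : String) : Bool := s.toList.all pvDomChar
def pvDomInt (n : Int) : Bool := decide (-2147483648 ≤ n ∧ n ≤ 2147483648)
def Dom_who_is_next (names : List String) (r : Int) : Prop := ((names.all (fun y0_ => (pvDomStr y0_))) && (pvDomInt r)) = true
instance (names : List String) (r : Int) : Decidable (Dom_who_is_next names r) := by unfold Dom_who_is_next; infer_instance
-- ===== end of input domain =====

-- B replaces A's step-by-step queue simulation (O(r) rotations) by a logarithmic
-- round search plus one closed-form division: asymptotically faster.

-- ===== PORT A =====
-- A's while loop; the fuel only makes the recursion total (it is never exhausted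
-- on inputs satisfying Pre_, proved below).
def whoALoop : Nat → List (String × Int) → Int → Int → String
  | 0, _, _, _ => ""
  | fuel+1, detail, count, r =>
    match detail with
    | [] => ""        -- Python: detail[0] raises IndexError (excluded by Pre_)
    | (name, d) :: rest =>
      if ¬(count - 1 < r) ∨ ¬(r < count + d + 1) then
        whoALoop fuel (rest ++ [(name, d * 2)]) (count + d) r
      else name

def who_is_next (names : List String) (r : Int) : String :=
  whoALoop (r.toNat + 1) (names.map (fun i => (i, (1 : Int)))) 0 r

-- ===== PORT B =====
-- B's while loop searching for the round k (the fuel only makes it total;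
-- it is never exhausted on inputs satisfying Pre_, proved below).
def whoBLoop : Nat → Int → Int → Nat → Nat
  | 0, _, _, k => k
  | fuel+1, n, r, k => if n * (2 ^ (k + 1) - 1) < r then whoBLoop fuel n r (k + 1) else k

def who_is_next_alt (names : List String) (r : Int) : String :=
  let n : Int := names.length
  if r ≤ 1 then (PySem.List.pyGet? names 0).getD ""
  else
    let k := whoBLoop (r.toNat + 1) n r 0
    let block : Int := 2 ^ k
    (PySem.List.pyGet? names (PySem.Int.floordiv (r - n * (block - 1) - 1) block)).getD ""

-- ===== PRECONDITION & SPEC =====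
-- Pre_ excludes names = [] (Python A raises IndexError) and r < 0
-- (Python A's loop never terminates there).
def Pre_who_is_next (names : List String) (r : Int) : Prop := names ≠ [] ∧ 0 ≤ r
instance (names : List String) (r : Int) : Decidable (Pre_who_is_next names r) := by
  unfold Pre_who_is_next; infer_instance

def pvWitness_who_is_next : List String × Int := (["a", "b"], 5)

def Spec_who_is_next (names : List String) (r : Int) (out : String) : Prop := out = who_is_next_alt names r
instance (names : List String) (r : Int) (out : String) : Decidable (Spec_who_is_next names r out) := by unfold Spec_who_is_next; infer_instance

-- ===== CLAIM (what is proved, stated in full; the proofs are below) =====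
def Claim_equal_who_is_next : Prop := ∀ (names : List String) (r : Int), Dom_who_is_next names r → Pre_who_is_next names r → Spec_who_is_next names r (who_is_next names r)

-- ===== LEMMAS AND PROOFS =====

-- S n t = number of positions consumed after t queue steps: Σ_{s<t} 2^(s/n).
def Ssum (n : Nat) : Nat → Int
  | 0 => 0
  | t+1 => Ssum n t + 2 ^ (t / n)

-- the queue after t steps of A's loop
def invDetail (names : List String) (t : Nat) : List (String × Int) :=
  (List.range names.length).map
    (fun j => (names.getD ((t + j) % names.length) "", (2 : Int) ^ ((t + j) / names.length)))

lemma Ssum_succ (n t : Nat) : Ssum n (t+1) = Ssum n t + 2 ^ (t / n) := rfl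

lemma Ssum_lt (n : Nat) {a b : Nat} (h : a < b) : Ssum n a < Ssum n b := by
  induction b with
  | zero => exact absurd h (Nat.not_lt_zero a)
  | succ b ih =>
    have hpow : (0:Int) < 2 ^ (b / n) := by positivity
    rw [Ssum_succ]
    rcases Nat.lt_succ_iff_lt_or_eq.mp h with h' | h'
    · linarith [ih h']
    · subst h'; linarith

lemma Ssum_le (n : Nat) {a b : Nat} (h : a ≤ b) : Ssum n a ≤ Ssum n b := by
  rcases Nat.lt_or_ge a b with h' | h'
  · exact le_of_lt (Ssum_lt n h')
  · have : a = b := by omega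
    simp [this]

lemma Ssum_ge_self (n : Nat) (t : Nat) : (t : Int) ≤ Ssum n t := by
  induction t with
  | zero => simp [Ssum]
  | succ t ih =>
    have : (1:Int) ≤ 2 ^ (t / n) := one_le_pow₀ (by norm_num)
    rw [Ssum_succ]; push_cast; omega

lemma invDetail_cons (names : List String) (t : Nat) (m : Nat) (hm : names.length = m + 1) :
    invDetail names t =
      (names.getD (t % names.length) "", (2 : Int) ^ (t / names.length)) ::
        (List.range m).map
          (fun j => (names.getD ((t + 1 + j) % names.length) "", (2 : Int) ^ ((t + 1 + j) / names.length))) := by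
  unfold invDetail
  rw [show List.range names.length = 0 :: (List.range m).map (· + 1) from by
    rw [hm, List.range_succ_eq_map]]
  simp only [List.map_cons, List.map_map, Function.comp_def, Nat.add_zero]
  congr 1
  apply List.map_congr_left
  intro j _
  rw [show t + (j + 1) = t + 1 + j from by omega]

lemma invDetail_step (names : List String) (t : Nat) (m : Nat) (hm : names.length = m + 1) :
    ((List.range m).map
        (fun j => (names.getD ((t + 1 + j) % names.length) "", (2 : Int) ^ ((t + 1 + j) / names.length))))
      ++ [(names.getD (t % names.length) "", (2 : Int) ^ (t / names.length) * 2)]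
    = invDetail names (t + 1) := by
  unfold invDetail
  rw [show List.range names.length = List.range m ++ [m] from by rw [hm, List.range_succ]]
  simp only [List.map_append, List.map_cons, List.map_nil]
  have h1 : (t + 1 + m) % names.length = t % names.length := by
    rw [hm, show t + 1 + m = t + (m + 1) from by omega, Nat.add_mod_right]
  have h2 : (t + 1 + m) / names.length = t / names.length + 1 := by
    rw [hm, show t + 1 + m = t + (m + 1) from by omega, Nat.add_div_right _ (by omega)]
  rw [h1, h2, pow_succ]

-- A's loop, from any reachable state, returns the name at u % n, where u is the
-- first step index with r ≤ Ssum n (u+1).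
lemma whoALoop_eq (names : List String) (r : Int) (u : Nat)
    (hne : names ≠ []) (hu : r ≤ Ssum names.length (u + 1)) :
    ∀ fuel t, t ≤ u →
      (∀ v, t ≤ v → v < u → Ssum names.length (v + 1) < r) →
      Ssum names.length t ≤ r → u + 1 - t ≤ fuel →
      whoALoop fuel (invDetail names t) (Ssum names.length t) r
        = names.getD (u % names.length) "" := by
  intro fuel
  induction fuel with
  | zero => intro t h1 _ _ h4; omega
  | succ fuel ih =>
    intro t htu hmin hle hfuel
    obtain ⟨m, hm⟩ : ∃ m, names.length = m + 1 := by
      cases names with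
      | nil => exact absurd rfl hne
      | cons a l => exact ⟨l.length, rfl⟩
    rw [invDetail_cons names t m hm]
    rw [whoALoop]
    by_cases hstop : r ≤ Ssum names.length t + 2 ^ (t / names.length)
    · -- loop exits now; u must be t
      have hut : u = t := by
        by_contra hne'
        have : t < u := by omega
        have := hmin t (le_refl _) this
        rw [Ssum_succ] at this
        omega
      have hcond : ¬ (¬(Ssum names.length t - 1 < r) ∨ ¬(r < Ssum names.length t + 2 ^ (t / names.length) + 1)) := by
        push_neg
        constructor <;> omega
      rw [if_neg hcond, hut]
    · -- loop continues
      push_neg at hstop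
      have htu' : t < u := by
        rcases Nat.lt_or_ge t u with h | h
        · exact h
        · have : t = u := by omega
          subst this
          rw [Ssum_succ] at hu; omega
      have hcond : (¬(Ssum names.length t - 1 < r) ∨ ¬(r < Ssum names.length t + 2 ^ (t / names.length) + 1)) := by
        right; omega
      rw [if_pos hcond]
      rw [invDetail_step names t m hm]
      have : Ssum names.length t + 2 ^ (t / names.length) = Ssum names.length (t + 1) := (Ssum_succ _ _).symm
      rw [this]
      exact ih (t + 1) htu' (fun v hv hv' => hmin v (by omega) hv') (le_of_lt hstop) (by omega)

-- B's loop returns the least k with r ≤ n * (2^(k+1) - 1).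
lemma whoBLoop_eq (n r : Int) (ks : Nat) (hks : r ≤ n * (2 ^ (ks + 1) - 1)) :
    ∀ fuel k, k ≤ ks →
      (∀ j, k ≤ j → j < ks → n * (2 ^ (j + 1) - 1) < r) →
      ks - k < fuel → whoBLoop fuel n r k = ks := by
  intro fuel
  induction fuel with
  | zero => intro k _ _ h; omega
  | succ fuel ih =>
    intro k hk hmin hfuel
    rw [whoBLoop]
    by_cases hc : n * (2 ^ (k + 1) - 1) < r
    · have hkk : k < ks := by
        rcases Nat.lt_or_ge k ks with h | h
        · exact h
        · have : k = ks := by omega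
          subst this; omega
      rw [if_pos hc]
      exact ih (k + 1) hkk (fun j hj hj' => hmin j (by omega) hj') (by omega)
    · rw [if_neg hc]
      by_contra hne
      have : k < ks := by omega
      have := hmin k (le_refl _) this
      omega

lemma Ssum_round (n q : Nat) (hn : 0 < n) :
    ∀ i, i ≤ n → Ssum n (q * n + i) = Ssum n (q * n) + i * 2 ^ q := by
  intro i
  induction i with
  | zero => simp
  | succ i ih =>
    intro h
    have hi : i < n := by omega
    have hdiv : (q * n + i) / n = q := by
      have : q * n + i = i + n * q := by ring
      rw [this, Nat.add_mul_div_left _ _ hn, Nat.div_eq_of_lt hi]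
      omega
    have : q * n + (i + 1) = (q * n + i) + 1 := by ring
    rw [this, Ssum_succ, hdiv, ih (by omega)]
    push_cast; ring

lemma Ssum_full (n : Nat) (hn : 0 < n) : ∀ q, Ssum n (q * n) = (n : Int) * (2 ^ q - 1) := by
  intro q
  induction q with
  | zero => simp [Ssum]
  | succ q ih =>
    have : (q + 1) * n = q * n + n := by ring
    rw [this, Ssum_round n q hn n (le_refl _), ih]
    push_cast; ring

lemma Ssum_closed (n : Nat) (hn : 0 < n) (q i : Nat) (hi : i ≤ n) :
    Ssum n (q * n + i) = (n : Int) * (2 ^ q - 1) + i * 2 ^ q := by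
  rw [Ssum_round n q hn i hi, Ssum_full n hn q]

-- main theorem, proved below and cited by name at the bottom
lemma who_eq (names : List String) (r : Int) (hne : names ≠ []) (hr : 0 ≤ r) :
    who_is_next names r = who_is_next_alt names r := by
  obtain ⟨m, hm⟩ : ∃ m, names.length = m + 1 := by
    cases names with
    | nil => exact absurd rfl hne
    | cons a l => exact ⟨l.length, rfl⟩
  have hn : 0 < names.length := by omega
  have hn' : (1 : Int) ≤ (names.length : Int) := by exact_mod_cast hn
  -- the initial queue is invDetail names 0
  have hinit : names.map (fun i => (i, (1 : Int))) = invDetail names 0 := by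
    unfold invDetail
    apply List.ext_getElem
    · simp
    · intro j h1 h2
      have hj : j < names.length := by simpa using h1
      simp [Nat.mod_eq_of_lt hj, Nat.div_eq_of_lt hj, List.getD_eq_getElem?_getD,
        List.getElem?_eq_getElem hj]
  have hS0 : Ssum names.length 0 = 0 := rfl
  unfold who_is_next who_is_next_alt
  by_cases hr1 : r ≤ 1
  · -- A stops at step 0
    rw [if_pos hr1, hinit]
    have h0 : whoALoop (r.toNat + 1) (invDetail names 0) (Ssum names.length 0) r
        = names.getD (0 % names.length) "" := by
      apply whoALoop_eq names r 0 hne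
      · rw [Ssum_succ, hS0]
        simp [Nat.div_eq_of_lt hn]
        omega
      · omega
      · intro v h1 h2; omega
      · rw [hS0]; exact hr
      · omega
    rw [hS0] at h0
    rw [h0]
    cases names with
    | nil => exact absurd rfl hne
    | cons a l => simp
  · rw [if_neg hr1]
    push_neg at hr1
    have hr2 : 2 ≤ r := by omega
    -- the least round ks with r ≤ n*(2^(ks+1)-1) exists
    have hex : ∃ k : Nat, r ≤ (names.length : Int) * (2 ^ (k + 1) - 1) := by
      refine ⟨r.toNat, ?_⟩
      have h1 : (r.toNat : Int) = r := Int.toNat_of_nonneg hr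
      have h2 : (r.toNat : Int) + 1 ≤ 2 ^ (r.toNat + 1) := by
        have := Nat.lt_two_pow_self (n := r.toNat)
        have h3 : (r.toNat : Int) < 2 ^ r.toNat := by exact_mod_cast this
        have h4 : (2:Int) ^ r.toNat ≤ 2 ^ (r.toNat + 1) := by
          apply pow_le_pow_right₀ <;> omega
        omega
      have h5 : (2:Int) ^ (r.toNat + 1) - 1 ≤ (names.length : Int) * (2 ^ (r.toNat + 1) - 1) := by
        have h6 : (1:Int) ≤ 2 ^ (r.toNat + 1) := one_le_pow₀ (by norm_num)
        nlinarith
      omega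
    classical
    let ks := Nat.find hex
    have hks_le : r ≤ (names.length : Int) * (2 ^ (ks + 1) - 1) := Nat.find_spec hex
    have hks_min : ∀ j, j < ks → (names.length : Int) * (2 ^ (j + 1) - 1) < r := by
      intro j hj
      have := Nat.find_min hex hj
      omega
    -- B's loop returns ks
    have hB : whoBLoop (r.toNat + 1) (names.length : Int) r 0 = ks := by
      apply whoBLoop_eq _ _ _ hks_le _ 0 (by omega) (fun j _ hj' => hks_min j hj')
      -- fuel: ks ≤ r.toNat
      have : (ks : Int) < r := by
        cases Nat.eq_zero_or_pos ks with
        | inl h => rw [h]; omega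
        | inr h =>
          have := hks_min (ks - 1) (by omega)
          have hk1 : ks - 1 + 1 = ks := by omega
          rw [hk1] at this
          have h2 : (ks : Int) + 1 ≤ 2 ^ ks := by
            have := Nat.lt_two_pow_self (n := ks)
            exact_mod_cast this
          have h5 : (2:Int) ^ ks - 1 ≤ (names.length : Int) * (2 ^ ks - 1) := by
            have h6 : (1:Int) ≤ 2 ^ ks := one_le_pow₀ (by norm_num)
            nlinarith
          omega
      omega
    rw [hB]
    -- the index within round ks
    set nI : Int := (names.length : Int) with hnI
    have hblock : (0:Int) < 2 ^ ks := by positivity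
    set x : Int := r - nI * (2 ^ ks - 1) - 1 with hx
    have hx0 : 0 ≤ x := by
      cases Nat.eq_zero_or_pos ks with
      | inl h => rw [hx, h]; simp; omega
      | inr h =>
        have := hks_min (ks - 1) (by omega)
        have hk1 : ks - 1 + 1 = ks := by omega
        rw [hk1] at this
        rw [hx]; omega
    have hxlt : x < nI * 2 ^ ks := by
      rw [hx]
      have : nI * (2 ^ (ks + 1) - 1) = nI * (2 ^ ks - 1) + nI * 2 ^ ks := by ring
      omega
    set i : Int := PySem.Int.floordiv x (2 ^ ks) with hi
    have hifd : i = x / 2 ^ ks := by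
      rw [hi, PySem.Int.floordiv_eq_ediv_of_pos hblock]
    have hi0 : 0 ≤ i := by rw [hifd]; exact Int.ediv_nonneg hx0 (le_of_lt hblock)
    have hidiv : i * 2 ^ ks ≤ x ∧ x < (i + 1) * 2 ^ ks := by
      have hmod1 : 0 ≤ x % 2 ^ ks := Int.emod_nonneg x hblock.ne'
      have hmod2 : x % 2 ^ ks < 2 ^ ks := Int.emod_lt_of_pos x hblock
      have heq : 2 ^ ks * (x / 2 ^ ks) + x % 2 ^ ks = x := Int.mul_ediv_add_emod x (2 ^ ks)
      constructor
      · rw [hifd]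
        have hcomm : x / 2 ^ ks * 2 ^ ks = 2 ^ ks * (x / 2 ^ ks) := mul_comm _ _
        linarith
      · rw [hifd]
        have hexp : (x / 2 ^ ks + 1) * 2 ^ ks = 2 ^ ks * (x / 2 ^ ks) + 2 ^ ks := by ring
        linarith
    have hin : i < nI := by
      by_contra h
      push_neg at h
      have : nI * 2 ^ ks ≤ i * 2 ^ ks := by
        apply mul_le_mul_of_nonneg_right h (le_of_lt hblock)
      omega
    -- A stops at step u = ks * n + i.toNat
    set u : Nat := ks * names.length + i.toNat with hu
    have hitoNat : (i.toNat : Int) = i := Int.toNat_of_nonneg hi0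
    have hiltn : i.toNat < names.length := by omega
    have hSu : Ssum names.length u = nI * (2 ^ ks - 1) + i * 2 ^ ks := by
      rw [hu, Ssum_closed names.length hn ks i.toNat (by omega), hitoNat]
    have hSu1 : Ssum names.length (u + 1) = nI * (2 ^ ks - 1) + (i + 1) * 2 ^ ks := by
      have : u + 1 = ks * names.length + (i.toNat + 1) := by omega
      rw [this, Ssum_closed names.length hn ks (i.toNat + 1) (by omega)]
      have hc : ((i.toNat + 1 : Nat) : Int) = i + 1 := by omega
      rw [hc]
    have hSu_lt : Ssum names.length u < r := by rw [hSu]; omega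
    have hSu1_ge : r ≤ Ssum names.length (u + 1) := by rw [hSu1]; omega
    have hA : whoALoop (r.toNat + 1) (invDetail names 0) (Ssum names.length 0) r
        = names.getD (u % names.length) "" := by
      apply whoALoop_eq names r u hne hSu1_ge
      · omega
      · intro v _ hv
        calc Ssum names.length (v + 1) ≤ Ssum names.length u := Ssum_le _ (by omega)
          _ < r := hSu_lt
      · rw [hS0]; omega
      · -- fuel: u + 1 ≤ r.toNat + 1, i.e. u < r, from u ≤ Ssum u < r
        have h1 := Ssum_ge_self names.length u
        omega
    rw [hS0] at hA
    rw [hinit, hA]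
    have humod : u % names.length = i.toNat := by
      rw [hu, Nat.mul_comm ks names.length, Nat.mul_add_mod, Nat.mod_eq_of_lt hiltn]
    rw [humod]
    show names.getD i.toNat "" = (PySem.List.pyGet? names i).getD ""
    rw [PySem.List.pyGet?_eq_some_getElem (xs := names) hi0 (by exact_mod_cast hin)]
    simp [List.getD_eq_getElem?_getD, List.getElem?_eq_getElem hiltn]

-- ===== VERDICT (by name: the statement is the Claim_ definition above) =====
theorem who_is_next_spec : Claim_equal_who_is_next := by
  intro names r _ hpre
  unfold Spec_who_is_next
  exact who_eq names r hpre.1 hpre.2
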